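-- pv_equiv track=rewrite | github.com/carlosdlfuente/negsent | setup.py | get_columnas_b_i_scope
-- ===== SOURCE A (Python) =====
-- def get_columnas_b_i_scope(cue_b_i, cue_b_i_pos):
--     columnas = []
--     grupo = [cue_b_i[0]]
--     grupo_pos = [cue_b_i_pos[0]]
--     grupo_final = []
--     grupo_pos_final = []
--     for i , j, k in zip(cue_b_i[1:], cue_b_i_pos[1:], range(len(cue_b_i_pos[1:]))):
--         if i == 'I-Sco' and (cue_b_i_pos[k+1] - cue_b_i_pos[k] == 1):
--             grupo.append(i)
--             grupo_pos.append(j)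
--         else:
--             grupo_final.append(grupo)
--             grupo = []
--             grupo.append(i)
--             grupo_pos_final.append(grupo_pos)
--             grupo_pos = []
--             grupo_pos.append(j)
--     grupo_final.append(grupo)
--     grupo_pos_final.append(grupo_pos)
--
--     for i in range(len(grupo_final)):
--         columnas.append('sco_' + str(i))
--
--     return(columnas, grupo_pos_final)
-- ===== SOURCE B (Python) =====
-- def get_columnas_b_i_scope(cue_b_i, cue_b_i_pos):
--     # build the groups back-to-front: walk the paired sequence from the end;
--     # a position either chains into the group being collected (label 'I-Sco'
--     # and position difference 1) or closes it and starts a new one.  The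
--     # current group and the list of finished groups are collected in reverse
--     # (appends only) and flipped once at the end.
--     pairs = [(cue_b_i[0], cue_b_i_pos[0])] + list(zip(cue_b_i[1:], cue_b_i_pos[1:]))
--     cur = [pairs[-1][1]]          # current group, positions in reverse order
--     rev_groups = []               # finished groups, last group first
--     for (lab, pos), (_, ppos) in zip(reversed(pairs[1:]), reversed(pairs[:-1])):
--         if lab == 'I-Sco' and pos - ppos == 1:
--             cur.append(ppos)
--         else:
--             rev_groups.append(cur[::-1])
--             cur = [ppos]
--     rev_groups.append(cur[::-1])
--     groups = rev_groups[::-1]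
--     columnas = ['sco_' + str(i) for i in range(len(groups))]
--     return (columnas, groups)
-- ===== Notes on version B (the rewrite author's own statement) =====
-- stated objective: alternative
-- what changed: A walks forward with mutable accumulator groups and positional indexing into cue_b_i_pos; B builds the group list back-to-front, walking the paired sequence from the end and prepending each position into the current first group or opening a new one, with no index arithmetic.
import Mathlib
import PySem

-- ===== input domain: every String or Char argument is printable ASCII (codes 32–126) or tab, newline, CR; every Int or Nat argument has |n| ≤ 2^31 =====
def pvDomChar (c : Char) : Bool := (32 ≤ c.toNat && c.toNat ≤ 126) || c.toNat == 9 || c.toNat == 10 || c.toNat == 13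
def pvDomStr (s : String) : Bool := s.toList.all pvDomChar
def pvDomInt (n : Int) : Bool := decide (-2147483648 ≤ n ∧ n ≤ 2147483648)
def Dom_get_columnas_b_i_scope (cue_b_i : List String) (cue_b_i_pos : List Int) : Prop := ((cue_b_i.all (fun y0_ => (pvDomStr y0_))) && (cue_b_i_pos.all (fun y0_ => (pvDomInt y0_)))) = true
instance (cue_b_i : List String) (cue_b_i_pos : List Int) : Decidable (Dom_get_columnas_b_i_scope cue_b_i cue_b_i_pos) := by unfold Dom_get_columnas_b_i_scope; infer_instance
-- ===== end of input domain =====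

-- B builds the group list back-to-front (walking the paired sequence from the end, collecting in
-- reverse, flipping once) instead of A's forward loop with positional indexing; same return value.

-- ===== PORT A =====
-- loop body of A's for-loop: state = ((grupo, grupo_pos), (grupo_final, grupo_pos_final)), element = ((i, j), k)
def stepA (p : List Int)
    (s : (List String × List Int) × (List (List String) × List (List Int)))
    (t : (String × Int) × Nat) :
    (List String × List Int) × (List (List String) × List (List Int)) :=
  if t.1.1 = "I-Sco" ∧ (PySem.List.pyGet? p ((t.2 : Int) + 1)).getD 0 - (PySem.List.pyGet? p (t.2 : Int)).getD 0 = 1 then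
    ((s.1.1 ++ [t.1.1], s.1.2 ++ [t.1.2]), s.2)
  else
    (([t.1.1], [t.1.2]), (s.2.1 ++ [s.1.1], s.2.2 ++ [s.1.2]))

-- zip(cue_b_i[1:], cue_b_i_pos[1:], range(len(cue_b_i_pos[1:]))) = zipIdx of the zipped tails
-- (range(len(cue_b_i_pos[1:])) is at least as long as the zip of the two tails, so it never truncates).
-- cue_b_i[0] / cue_b_i_pos[0] raise IndexError on empty input: pyGet? = none there, excluded by Pre_.
def get_columnas_b_i_scope (cue_b_i : List String) (cue_b_i_pos : List Int) : List String × List (List Int) :=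
  let grupo : List String := [(PySem.List.pyGet? cue_b_i 0).getD ""]
  let grupo_pos : List Int := [(PySem.List.pyGet? cue_b_i_pos 0).getD 0]
  let st := (((cue_b_i.drop 1).zip (cue_b_i_pos.drop 1)).zipIdx).foldl (stepA cue_b_i_pos)
      ((grupo, grupo_pos), ([], []))
  let grupo_final := st.2.1 ++ [st.1.1]
  let grupo_pos_final := st.2.2 ++ [st.1.2]
  let columnas := (List.range grupo_final.length).map (fun i => "sco_" ++ PySem.Int.toStr (i : Int))
  (columnas, grupo_pos_final)

-- ===== PORT B =====
-- loop body of Source B's reversed loop: state = (cur, rev_groups), element = ((lab, pos), (plab, ppos))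
def stepB (st : List Int × List (List Int)) (t : (String × Int) × (String × Int)) :
    List Int × List (List Int) :=
  if t.1.1 = "I-Sco" ∧ t.1.2 - t.2.2 = 1 then (st.1 ++ [t.2.2], st.2)
  else ([t.2.2], st.2 ++ [st.1.reverse])

def get_columnas_b_i_scope_alt (cue_b_i : List String) (cue_b_i_pos : List Int) : List String × List (List Int) :=
  let pairs := ((PySem.List.pyGet? cue_b_i 0).getD "", (PySem.List.pyGet? cue_b_i_pos 0).getD 0)
      :: (cue_b_i.drop 1).zip (cue_b_i_pos.drop 1)
  let cur0 : List Int := [((PySem.List.pyGet? pairs (-1)).getD ("", 0)).2]   -- pairs[-1][1]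
  -- zip(reversed(pairs[1:]), reversed(pairs[:-1]))
  let st := (((pairs.drop 1).reverse).zip ((PySem.List.slice pairs none (some (-1))).reverse)).foldl
      stepB (cur0, [])
  let groups := (st.2 ++ [st.1.reverse]).reverse
  let columnas := (List.range groups.length).map (fun i => "sco_" ++ PySem.Int.toStr (i : Int))
  (columnas, groups)

-- ===== PRECONDITION & SPEC =====
-- Pre_ excludes exactly the inputs on which A raises IndexError (cue_b_i[0] / cue_b_i_pos[0] on an empty list).
def Pre_get_columnas_b_i_scope (cue_b_i : List String) (cue_b_i_pos : List Int) : Prop :=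
  cue_b_i ≠ [] ∧ cue_b_i_pos ≠ []
instance (cue_b_i : List String) (cue_b_i_pos : List Int) : Decidable (Pre_get_columnas_b_i_scope cue_b_i cue_b_i_pos) := by unfold Pre_get_columnas_b_i_scope; infer_instance
def pvWitness_get_columnas_b_i_scope : List String × List Int := (["B-Sco", "I-Sco"], [3, 4])

def Spec_get_columnas_b_i_scope (cue_b_i : List String) (cue_b_i_pos : List Int) (out : List String × List (List Int)) : Prop := out = get_columnas_b_i_scope_alt cue_b_i cue_b_i_pos
instance (cue_b_i : List String) (cue_b_i_pos : List Int) (out : List String × List (List Int)) : Decidable (Spec_get_columnas_b_i_scope cue_b_i cue_b_i_pos out) := by unfold Spec_get_columnas_b_i_scope; infer_instance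

-- ===== CLAIM (what is proved, stated in full; the proofs are below) =====
def Claim_equal_get_columnas_b_i_scope : Prop := ∀ (cue_b_i : List String) (cue_b_i_pos : List Int), Dom_get_columnas_b_i_scope cue_b_i cue_b_i_pos → Pre_get_columnas_b_i_scope cue_b_i cue_b_i_pos → Spec_get_columnas_b_i_scope cue_b_i cue_b_i_pos (get_columnas_b_i_scope cue_b_i cue_b_i_pos)

-- ===== LEMMAS AND PROOFS =====

-- common abstraction both proofs target: the groups of positions, first group headed by p0,
-- as a structural recursion on the paired tail
def grp : Int → List (String × Int) → List (List Int)
  | p0, [] => [[p0]]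
  | p0, (lab, pos) :: rest =>
    match grp pos rest with
    | g :: gs => if lab = "I-Sco" ∧ pos - p0 = 1 then (p0 :: g) :: gs else [p0] :: g :: gs
    | [] => []

-- index-free abstraction of A's loop: carries the previous position explicitly,
-- returns (grupo_final ++ [grupo], grupo_pos_final ++ [grupo_pos])
def runPair (prev : Int) (g : List String) (gp : List Int) :
    List (String × Int) → List (List String) × List (List Int)
  | [] => ([g], [gp])
  | (i, j) :: rest =>
    if i = "I-Sco" ∧ j - prev = 1 then runPair j (g ++ [i]) (gp ++ [j]) rest
    else
      let r := runPair j [i] [j] rest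
      (g :: r.1, gp :: r.2)

-- core of grp: (rest of the current first group, the later groups)
def gcore : Int → List (String × Int) → List Int × List (List Int)
  | _, [] => ([], [])
  | prev, (i, j) :: rest =>
    let r := gcore j rest
    if i = "I-Sco" ∧ j - prev = 1 then (j :: r.1, r.2)
    else ([], (j :: r.1) :: r.2)

theorem grp_eq_gcore : ∀ (L : List (String × Int)) (prev : Int),
    grp prev L = (prev :: (gcore prev L).1) :: (gcore prev L).2 := by
  intro L
  induction L with
  | nil => intro prev; simp [grp, gcore]
  | cons hd tl ih =>
    intro prev
    obtain ⟨i, j⟩ := hd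
    by_cases hc : i = "I-Sco" ∧ j - prev = 1 <;>
      simp [grp, gcore, ih j, hc]

theorem runPair_snd : ∀ (L : List (String × Int)) (prev : Int) (g : List String) (gp : List Int),
    (runPair prev g gp L).2 = (gp ++ (gcore prev L).1) :: (gcore prev L).2 := by
  intro L
  induction L with
  | nil => intro prev g gp; simp [runPair, gcore]
  | cons hd tl ih =>
    intro prev g gp
    obtain ⟨i, j⟩ := hd
    by_cases hc : i = "I-Sco" ∧ j - prev = 1 <;>
      simp [runPair, gcore, hc, ih j]

theorem runPair_len : ∀ (L : List (String × Int)) (prev : Int) (g : List String) (gp : List Int),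
    (runPair prev g gp L).1.length = (runPair prev g gp L).2.length := by
  intro L
  induction L with
  | nil => intro prev g gp; simp [runPair]
  | cons hd tl ih =>
    intro prev g gp
    obtain ⟨i, j⟩ := hd
    by_cases hc : i = "I-Sco" ∧ j - prev = 1 <;>
      simp [runPair, hc, ih j]

-- A's indexed fold computes runPair, once p[k0] holds the previous position and
-- p[k0+m+1] is the position component of the m-th remaining pair
theorem foldA_eq_runPair (p : List Int) :
    ∀ (L : List (String × Int)) (k0 : Nat) (prev : Int) (g : List String) (gp : List Int)
      (gf : List (List String)) (gpf : List (List Int)),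
      (∀ m (hm : m < L.length), p[k0 + m + 1]? = some (L[m].2)) →
      p[k0]? = some prev →
      (((L.zipIdx k0).foldl (stepA p) ((g, gp), (gf, gpf))).2.1
          ++ [((L.zipIdx k0).foldl (stepA p) ((g, gp), (gf, gpf))).1.1],
       ((L.zipIdx k0).foldl (stepA p) ((g, gp), (gf, gpf))).2.2
          ++ [((L.zipIdx k0).foldl (stepA p) ((g, gp), (gf, gpf))).1.2])
        = (gf ++ (runPair prev g gp L).1, gpf ++ (runPair prev g gp L).2) := by
  intro L
  induction L with
  | nil => intro k0 prev g gp gf gpf h1 h2; simp [runPair]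
  | cons hd tl ih =>
    intro k0 prev g gp gf gpf h1 h2
    obtain ⟨i, j⟩ := hd
    have hj : p[k0 + 1]? = some j := by
      have := h1 0 (by simp); simpa using this
    have hstep : stepA p ((g, gp), (gf, gpf)) ((i, j), k0)
        = if i = "I-Sco" ∧ j - prev = 1 then ((g ++ [i], gp ++ [j]), (gf, gpf))
          else (([i], [j]), (gf ++ [g], gpf ++ [gp])) := by
      have e1 : PySem.List.pyGet? p ((k0 : Int) + 1) = some j := by
        have : ((k0 : Int) + 1) = ((k0 + 1 : Nat) : Int) := by push_cast; ring
        rw [this, PySem.List.pyGet?_natCast, hj]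
      have e2 : PySem.List.pyGet? p (k0 : Int) = some prev := by
        rw [PySem.List.pyGet?_natCast, h2]
      simp [stepA, e1, e2]
    have h1' : ∀ m (hm : m < tl.length), p[(k0 + 1) + m + 1]? = some (tl[m].2) := by
      intro m hm
      have := h1 (m + 1) (by simp; omega)
      have e : k0 + (m + 1) + 1 = (k0 + 1) + m + 1 := by omega
      rw [e] at this; simpa using this
    rw [List.zipIdx_cons, List.foldl_cons, hstep]
    by_cases hc : i = "I-Sco" ∧ j - prev = 1
    · rw [if_pos hc]
      rw [ih (k0 + 1) j (g ++ [i]) (gp ++ [j]) gf gpf h1' hj]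
      simp [runPair, hc]
    · rw [if_neg hc]
      rw [ih (k0 + 1) j [i] [j] (gf ++ [g]) (gpf ++ [gp]) h1' hj]
      simp [runPair, hc]

-- B's reversed fold computes grp
theorem foldB_eq_grp : ∀ (tl : List (String × Int)) (q0 : String × Int),
    (((tl.reverse.zip (((q0 :: tl).dropLast).reverse)).foldl stepB
        ([(((q0 :: tl).getLast?).getD ("", 0)).2], ([] : List (List Int)))).2
      ++ [(((tl.reverse.zip (((q0 :: tl).dropLast).reverse)).foldl stepB
        ([(((q0 :: tl).getLast?).getD ("", 0)).2], ([] : List (List Int)))).1).reverse]).reverse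
    = grp q0.2 tl := by
  intro tl
  induction tl with
  | nil => intro q0; simp [grp]
  | cons q1 rest ih =>
    intro q0
    -- the reversed adjacency list of q0 :: q1 :: rest is that of q1 :: rest with (q1, q0) appended
    have hsplit : ((q1 :: rest).reverse.zip (((q0 :: q1 :: rest).dropLast).reverse))
        = (rest.reverse.zip (((q1 :: rest).dropLast).reverse)) ++ [(q1, q0)] := by
      have hlen : rest.reverse.length = ((q1 :: rest).dropLast).reverse.length := by simp
      calc ((q1 :: rest).reverse.zip (((q0 :: q1 :: rest).dropLast).reverse))
          = ((rest.reverse ++ [q1]).zip ((((q1 :: rest).dropLast).reverse) ++ [q0])) := by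
            simp [List.dropLast_cons₂]
        _ = (rest.reverse.zip (((q1 :: rest).dropLast).reverse)) ++ ([q1].zip [q0]) :=
            List.zip_append hlen
        _ = (rest.reverse.zip (((q1 :: rest).dropLast).reverse)) ++ [(q1, q0)] := by simp
    have hlast : ((q0 :: q1 :: rest).getLast?).getD ("", 0) = ((q1 :: rest).getLast?).getD ("", 0) := by
      rw [List.getLast?_cons_cons]
    rw [hsplit, hlast, List.foldl_append]
    obtain ⟨lab, pos⟩ := q1
    -- name the state reached on the suffix and use the inductive hypothesis for its shape
    set st' := (rest.reverse.zip ((((lab, pos) :: rest).dropLast).reverse)).foldl stepB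
        ([((((lab, pos) :: rest).getLast?).getD ("", 0)).2], ([] : List (List Int))) with hst'
    have ihs : grp pos rest = st'.1.reverse :: st'.2.reverse := by
      have h := ih (lab, pos)
      rw [← h, ← hst']
      simp
    by_cases hc : lab = "I-Sco" ∧ pos - q0.2 = 1
    · simp [List.foldl_cons, stepB, hc, grp, ihs]
    · simp [List.foldl_cons, stepB, hc, grp, ihs]

-- ===== VERDICT (by name: the statement is the Claim_ definition above) =====
theorem get_columnas_b_i_scope_spec : Claim_equal_get_columnas_b_i_scope := by
  intro s p _ hpre
  obtain ⟨hs, hp⟩ := hpre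
  obtain ⟨a, s', rfl⟩ := List.exists_cons_of_ne_nil hs
  obtain ⟨b, p', rfl⟩ := List.exists_cons_of_ne_nil hp
  unfold Spec_get_columnas_b_i_scope get_columnas_b_i_scope get_columnas_b_i_scope_alt
  simp only [List.drop_one, List.tail_cons, PySem.List.pyGet?_zero_cons, Option.getD_some,
    PySem.List.pyGet?_neg_one, PySem.List.slice_to_neg_one]
  have hfold := foldA_eq_runPair (b :: p') (s'.zip p') 0 b [a] [b] [] []
    (by
      intro m hm
      have hmp : m < p'.length := lt_of_lt_of_le hm (by simp [List.length_zip])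
      simp [List.getElem_zip, hmp])
    (by simp)
  obtain ⟨e1, e2⟩ := Prod.mk.injEq _ _ _ _ ▸ hfold
  rw [e1, e2]
  have hB := foldB_eq_grp (s'.zip p') (a, b)
  rw [hB]
  have hlen := runPair_len (s'.zip p') b [a] [b]
  rw [runPair_snd] at hlen
  rw [runPair_snd, grp_eq_gcore]
  simp [hlen]
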